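-- pv_equiv track=rewrite | github.com/tawiza/tawiza | src/infrastructure/agents/ecocartographe/services.py | _detecter_mapping_colonnes
-- ===== SOURCE A (Python) =====
-- def _detecter_mapping_colonnes(colonnes: list[str]) -> dict[str, str]:
--     """Détecte automatiquement le mapping des colonnes"""
--     mapping = {}
--     colonnes_lower = {c.lower(): c for c in colonnes}
--
--     # Mapping nom
--     for key in ['nom', 'name', 'organisation', 'organization', 'raison_sociale', 'societe']:
--         if key in colonnes_lower:
--             mapping['nom'] = colonnes_lower[key]
--             break
--
--     # Mapping type
--     for key in ['type', 'categorie', 'category', 'type_acteur']: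
--         if key in colonnes_lower:
--             mapping['type'] = colonnes_lower[key]
--             break
--
--     # Mapping adresse
--     for key in ['adresse', 'address', 'rue']:
--         if key in colonnes_lower:
--             mapping['adresse'] = colonnes_lower[key]
--             break
--
--     # Mapping ville
--     for key in ['ville', 'city', 'commune']:
--         if key in colonnes_lower:
--             mapping['ville'] = colonnes_lower[key]
--             break
--
--     # Mapping code postal
--     for key in ['code_postal', 'cp', 'postal_code', 'zipcode']:
--         if key in colonnes_lower:
--             mapping['code_postal'] = colonnes_lower[key]
--             break
--
--     # Mapping description
--     for key in ['description', 'desc', 'activite', 'activity']: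
--         if key in colonnes_lower:
--             mapping['description'] = colonnes_lower[key]
--             break
--
--     # Mapping site web
--     for key in ['site_web', 'website', 'url', 'site']:
--         if key in colonnes_lower:
--             mapping['site_web'] = colonnes_lower[key]
--             break
--
--     # Mapping secteurs
--     for key in ['secteur', 'secteurs', 'sector', 'sectors', 'domaine']:
--         if key in colonnes_lower:
--             mapping['secteurs'] = colonnes_lower[key]
--             break
--
--     return mapping
-- ===== SOURCE B (Python) =====
-- _FIELDS = [
--     ('nom', ['nom', 'name', 'organisation', 'organization', 'raison_sociale', 'societe']),
--     ('type', ['type', 'categorie', 'category', 'type_acteur']),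
--     ('adresse', ['adresse', 'address', 'rue']),
--     ('ville', ['ville', 'city', 'commune']),
--     ('code_postal', ['code_postal', 'cp', 'postal_code', 'zipcode']),
--     ('description', ['description', 'desc', 'activite', 'activity']),
--     ('site_web', ['site_web', 'website', 'url', 'site']),
--     ('secteurs', ['secteur', 'secteurs', 'sector', 'sectors', 'domaine']),
-- ]
--
-- # inverted index: lowercase synonym -> (target field, priority rank)
-- _INDEX = {syn: (field, rank)
--           for field, keys in _FIELDS
--           for rank, syn in enumerate(keys)}
--
--
-- def _detecter_mapping_colonnes(colonnes):
--     """Détecte automatiquement le mapping des colonnes"""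
--     best = {}  # field -> (column, rank of the matched synonym)
--     for col in colonnes:
--         hit = _INDEX.get(col.lower())
--         if hit is None:
--             continue
--         field, rank = hit
--         cur = best.get(field)
--         if cur is None or rank <= cur[1]:
--             best[field] = (col, rank)
--     return {field: best[field][0] for field, _ in _FIELDS if field in best}
-- ===== Notes on version B (the rewrite author's own statement) =====
-- stated objective: alternative
-- what changed: Replaces A's eight per-field scans over a lowered-columns dict by a precomputed inverted index (synonym -> (field, rank)) and a single pass over the columns keeping the best-ranked match per field (later column wins on equal rank, matching dict overwrite), then assembles the result in field order.
import Mathlib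
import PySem

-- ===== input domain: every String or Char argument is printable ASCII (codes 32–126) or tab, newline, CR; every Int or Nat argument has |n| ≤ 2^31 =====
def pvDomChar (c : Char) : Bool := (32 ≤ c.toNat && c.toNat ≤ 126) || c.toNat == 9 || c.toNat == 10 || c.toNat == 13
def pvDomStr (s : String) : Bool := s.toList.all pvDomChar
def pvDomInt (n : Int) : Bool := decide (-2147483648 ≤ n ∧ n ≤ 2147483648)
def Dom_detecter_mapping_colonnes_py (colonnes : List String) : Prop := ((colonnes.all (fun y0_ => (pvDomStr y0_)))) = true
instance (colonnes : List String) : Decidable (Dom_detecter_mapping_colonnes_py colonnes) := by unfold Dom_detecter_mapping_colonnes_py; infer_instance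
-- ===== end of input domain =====

-- B replaces A's eight per-field scans with a precomputed inverted synonym index and a single
-- best-match pass over the columns (objective: alternative decomposition, same result).

-- ===== PORT A =====
-- A's 'for key in [...]: if key in colonnes_lower: …; break' — first key present in cl, its value
def pvScanA (keys : List String) (cl : PySem.Dict String String) : Option String :=
  match keys with
  | [] => none
  | k :: rest =>
    match cl.get? k with
    | some v => some v
    | none => pvScanA rest cl

-- A's 'mapping[field] = value' performed only when the scan found a key
def pvPut (m : PySem.Dict String String) (field : String) (o : Option String) :
    PySem.Dict String String :=
  match o with
  | some v => m.insert field v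
  | none => m

def detecter_mapping_colonnes_py (colonnes : List String) : List (String × String) :=
  let cl : PySem.Dict String String :=
    colonnes.foldl (fun d c => d.insert (PySem.Str.lower c) c) PySem.Dict.empty
  let m : PySem.Dict String String := PySem.Dict.empty
  let m := pvPut m "nom" (pvScanA ["nom", "name", "organisation", "organization", "raison_sociale", "societe"] cl)
  let m := pvPut m "type" (pvScanA ["type", "categorie", "category", "type_acteur"] cl)
  let m := pvPut m "adresse" (pvScanA ["adresse", "address", "rue"] cl)
  let m := pvPut m "ville" (pvScanA ["ville", "city", "commune"] cl)
  let m := pvPut m "code_postal" (pvScanA ["code_postal", "cp", "postal_code", "zipcode"] cl)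
  let m := pvPut m "description" (pvScanA ["description", "desc", "activite", "activity"] cl)
  let m := pvPut m "site_web" (pvScanA ["site_web", "website", "url", "site"] cl)
  let m := pvPut m "secteurs" (pvScanA ["secteur", "secteurs", "sector", "sectors", "domaine"] cl)
  m.items

-- ===== PORT B =====
def pvFieldsB : List (String × List String) :=
  [("nom", ["nom", "name", "organisation", "organization", "raison_sociale", "societe"]),
   ("type", ["type", "categorie", "category", "type_acteur"]),
   ("adresse", ["adresse", "address", "rue"]),
   ("ville", ["ville", "city", "commune"]),
   ("code_postal", ["code_postal", "cp", "postal_code", "zipcode"]),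
   ("description", ["description", "desc", "activite", "activity"]),
   ("site_web", ["site_web", "website", "url", "site"]),
   ("secteurs", ["secteur", "secteurs", "sector", "sectors", "domaine"])]

-- _INDEX = {syn: (field, rank) for field, keys in _FIELDS for rank, syn in enumerate(keys)}
def pvIndexB : PySem.Dict String (String × Int) :=
  PySem.Dict.ofList
    (pvFieldsB.flatMap (fun fk =>
      (PySem.List.enumerate fk.2).map (fun rs => (rs.2, (fk.1, rs.1)))))

-- body of B's 'for col in colonnes' loop
def pvBestStep (best : PySem.Dict String (String × Int)) (col : String) :
    PySem.Dict String (String × Int) :=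
  match pvIndexB.get? (PySem.Str.lower col) with
  | none => best
  | some fr =>
    match best.get? fr.1 with
    | none => best.insert fr.1 (col, fr.2)
    | some cur => if fr.2 ≤ cur.2 then best.insert fr.1 (col, fr.2) else best

def detecter_mapping_colonnes_py_alt (colonnes : List String) : List (String × String) :=
  let best := colonnes.foldl pvBestStep PySem.Dict.empty
  (pvFieldsB.foldl (fun m fk =>
      match best.get? fk.1 with
      | some p => m.insert fk.1 p.1
      | none => m) PySem.Dict.empty).items

-- ===== PRECONDITION & SPEC =====
def Spec_detecter_mapping_colonnes_py (colonnes : List String) (out : List (String × String)) : Prop := out = detecter_mapping_colonnes_py_alt colonnes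
instance (colonnes : List String) (out : List (String × String)) : Decidable (Spec_detecter_mapping_colonnes_py colonnes out) := by unfold Spec_detecter_mapping_colonnes_py; infer_instance

-- ===== CLAIM (what is proved, stated in full; the proofs are below) =====
def Claim_equal_detecter_mapping_colonnes_py : Prop := ∀ (colonnes : List String), Dom_detecter_mapping_colonnes_py colonnes → Spec_detecter_mapping_colonnes_py colonnes (detecter_mapping_colonnes_py colonnes)

-- ===== LEMMAS AND PROOFS =====

-- A's scan enriched with the rank of the key it stopped at
def pvScanR (keys : List String) (cl : PySem.Dict String String) : Option (String × Int) :=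
  match keys with
  | [] => none
  | k :: rest =>
    match cl.get? k with
    | some v => some (v, 0)
    | none => (pvScanR rest cl).map (fun p => (p.1, p.2 + 1))

lemma pvScanA_eq (keys : List String) (cl : PySem.Dict String String) :
    pvScanA keys cl = (pvScanR keys cl).map Prod.fst := by
  induction keys with
  | nil => rfl
  | cons k rest ih =>
    simp only [pvScanA, pvScanR]
    cases h : cl.get? k with
    | some v => rfl
    | none => rw [ih]; cases pvScanR rest cl <;> rfl

lemma pvScanR_empty (keys : List String) :
    pvScanR keys PySem.Dict.empty = none := by
  induction keys with
  | nil => rfl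
  | cons k rest ih => simp [pvScanR, PySem.Dict.get?_empty, ih]

lemma pvScanR_congr (keys : List String) (d d' : PySem.Dict String String)
    (h : ∀ k ∈ keys, d'.get? k = d.get? k) : pvScanR keys d' = pvScanR keys d := by
  induction keys with
  | nil => rfl
  | cons k rest ih =>
    simp only [pvScanR, h k (by simp), ih (fun k hk => h k (by simp [hk]))]

lemma pvScanR_nonneg (keys : List String) (d : PySem.Dict String String)
    (p : String × Int) (h : pvScanR keys d = some p) : 0 ≤ p.2 := by
  induction keys generalizing p with
  | nil => simp [pvScanR] at h
  | cons k rest ih =>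
    simp only [pvScanR] at h
    cases h2 : d.get? k with
    | some v => rw [h2] at h; cases h; simp
    | none =>
      rw [h2] at h
      cases h3 : pvScanR rest d with
      | none => rw [h3] at h; simp at h
      | some q => rw [h3] at h; cases h; have := ih q h3; simp; omega

lemma pvScanR_insert (keys : List String) (hnd : keys.Nodup) (r : Nat)
    (s c : String) (hr : keys[r]? = some s) (d : PySem.Dict String String) :
    pvScanR keys (d.insert s c) =
      match pvScanR keys d with
      | none => some (c, (r : Int))
      | some p => if (r : Int) ≤ p.2 then some (c, (r : Int)) else some p := by
  induction keys generalizing r d with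
  | nil => simp at hr
  | cons k rest ih =>
    cases r with
    | zero =>
      simp only [List.getElem?_cons_zero, Option.some.injEq] at hr
      subst hr
      simp only [pvScanR, PySem.Dict.get?_insert_self, Nat.cast_zero]
      cases h2 : d.get? k with
      | some v => simp
      | none =>
        cases h3 : pvScanR rest d with
        | none => simp
        | some q =>
          have hq := pvScanR_nonneg rest d q h3
          simp only [Option.map_some]
          rw [if_pos (by omega)]
    | succ r' =>
      simp only [List.getElem?_cons_succ] at hr
      have hsmem : s ∈ rest := List.mem_of_getElem? hr
      have hks : k ≠ s := fun heq => (List.nodup_cons.mp hnd).1 (heq ▸ hsmem)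
      cases h2 : d.get? k with
      | some v =>
        simp only [pvScanR, PySem.Dict.get?_insert_of_ne d c hks, h2]
        rw [if_neg (by push_cast; omega)]
      | none =>
        simp only [pvScanR, PySem.Dict.get?_insert_of_ne d c hks, h2]
        rw [ih (List.nodup_cons.mp hnd).2 r' hr d]
        cases h3 : pvScanR rest d with
        | none => simp
        | some q =>
          simp only [Option.map_some]
          by_cases hle : (r' : Int) ≤ q.2
          · rw [if_pos hle, if_pos (by push_cast; omega)]
            simp only [Option.map_some, Option.some.injEq, Prod.mk.injEq, true_and]
            push_cast; ring
          · rw [if_neg hle, if_neg (by push_cast; omega)]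
            simp

lemma pvIdx_some : ∀ fk ∈ pvFieldsB, ∀ k ∈ fk.2, (pvIndexB.get? k).isSome := by decide

lemma pvIdx_char : ∀ p ∈ pvIndexB.items, ∀ fk ∈ pvFieldsB,
    (p.2.1 = fk.1 → 0 ≤ p.2.2 ∧ fk.2[p.2.2.toNat]? = some p.1) ∧
    (p.2.1 ≠ fk.1 → p.1 ∉ fk.2) := by decide

lemma pvFields_nodup : ∀ fk ∈ pvFieldsB, fk.2.Nodup := by decide

lemma pvBest_get (field : String) (keys : List String)
    (hmem : (field, keys) ∈ pvFieldsB) (xs : List String) :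
    (xs.foldl pvBestStep PySem.Dict.empty).get? field
      = pvScanR keys (xs.foldl (fun d c => d.insert (PySem.Str.lower c) c) PySem.Dict.empty) := by
  induction xs using List.reverseRecOn with
  | nil => simp [pvScanR_empty, PySem.Dict.get?_empty]
  | append_singleton xs c ih =>
    rw [List.foldl_append, List.foldl_append]
    simp only [List.foldl_cons, List.foldl_nil]
    set D := xs.foldl (fun d c => d.insert (PySem.Str.lower c) c) PySem.Dict.empty with hD
    set B := xs.foldl pvBestStep PySem.Dict.empty with hB
    unfold pvBestStep
    cases h : pvIndexB.get? (PySem.Str.lower c) with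
    | none =>
      have hcg : pvScanR keys (D.insert (PySem.Str.lower c) c) = pvScanR keys D := by
        apply pvScanR_congr
        intro k hk
        apply PySem.Dict.get?_insert_of_ne
        intro hkeq
        have := pvIdx_some (field, keys) hmem k hk
        rw [hkeq, h] at this
        simp at this
      simp only [hcg, ih]
    | some fr =>
      obtain ⟨f', r⟩ := fr
      have hitems := PySem.Dict.mem_items_of_get?_eq_some pvIndexB h
      have hc := pvIdx_char _ hitems (field, keys) hmem
      by_cases hf : f' = field
      · subst hf
        obtain ⟨hr0, hget⟩ := hc.1 rfl
        have hcast : (r.toNat : Int) = r := Int.toNat_of_nonneg hr0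
        rw [pvScanR_insert keys (pvFields_nodup _ hmem) r.toNat (PySem.Str.lower c) c hget D,
            ← ih, hcast]
        cases h2 : B.get? f' with
        | none => simp [h2, PySem.Dict.get?_insert_self]
        | some cur =>
          simp only [h2]
          by_cases hle : r ≤ cur.2
          · rw [if_pos hle, if_pos hle]
            exact PySem.Dict.get?_insert_self B f' (c, r)
          · rw [if_neg hle, if_neg hle]
            exact h2
      · have hnotmem : PySem.Str.lower c ∉ keys := hc.2 hf
        rw [pvScanR_congr keys D (D.insert (PySem.Str.lower c) c)
              (fun k hk => PySem.Dict.get?_insert_of_ne D c (fun he => hnotmem (he ▸ hk))), ← ih]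
        have hne : field ≠ f' := fun he => hf he.symm
        cases h2 : B.get? f' with
        | none => simp [h2, PySem.Dict.get?_insert_of_ne B (c, r) hne]
        | some cur =>
          simp only [h2]
          by_cases hle : r ≤ cur.2
          · rw [if_pos hle]
            exact PySem.Dict.get?_insert_of_ne B (c, r) hne
          · rw [if_neg hle]

lemma pvPut_map (m : PySem.Dict String String) (field : String) (o : Option (String × Int)) :
    pvPut m field (o.map Prod.fst)
      = match o with | some p => m.insert field p.1 | none => m := by
  cases o <;> rfl

-- ===== VERDICT (by name: the statement is the Claim_ definition above) =====
theorem detecter_mapping_colonnes_py_spec : Claim_equal_detecter_mapping_colonnes_py := by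
  unfold Claim_equal_detecter_mapping_colonnes_py
  intro colonnes _
  unfold Spec_detecter_mapping_colonnes_py
  unfold detecter_mapping_colonnes_py detecter_mapping_colonnes_py_alt
  simp only [pvFieldsB, List.foldl_cons, List.foldl_nil]
  rw [pvBest_get "nom" ["nom", "name", "organisation", "organization", "raison_sociale", "societe"] (by decide) colonnes,
      pvBest_get "type" ["type", "categorie", "category", "type_acteur"] (by decide) colonnes,
      pvBest_get "adresse" ["adresse", "address", "rue"] (by decide) colonnes,
      pvBest_get "ville" ["ville", "city", "commune"] (by decide) colonnes,
      pvBest_get "code_postal" ["code_postal", "cp", "postal_code", "zipcode"] (by decide) colonnes,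
      pvBest_get "description" ["description", "desc", "activite", "activity"] (by decide) colonnes,
      pvBest_get "site_web" ["site_web", "website", "url", "site"] (by decide) colonnes,
      pvBest_get "secteurs" ["secteur", "secteurs", "sector", "sectors", "domaine"] (by decide) colonnes]
  simp only [pvScanA_eq, pvPut_map]
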